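-- pv_equiv track=rewrite | github.com/mortyc126-debug/SHA | step21_backward.py | sha256_forward
-- ===== SOURCE A (Python) =====
-- K256 = [
--     0x428a2f98, 0x71374491, 0xb5c0fbcf, 0xe9b5dba5,
--     0x3956c25b, 0x59f111f1, 0x923f82a4, 0xab1c5ed5,
--     0xd807aa98, 0x12835b01, 0x243185be, 0x550c7dc3,
--     0x72be5d74, 0x80deb1fe, 0x9bdc06a7, 0xc19bf174,
--     0xe49b69c1, 0xefbe4786, 0x0fc19dc6, 0x240ca1cc,
--     0x2de92c6f, 0x4a7484aa, 0x5cb0a9dc, 0x76f988da,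
--     0x983e5152, 0xa831c66d, 0xb00327c8, 0xbf597fc7,
--     0xc6e00bf3, 0xd5a79147, 0x06ca6351, 0x14292967,
--     0x27b70a85, 0x2e1b2138, 0x4d2c6dfc, 0x53380d13,
--     0x650a7354, 0x766a0abb, 0x81c2c92e, 0x92722c85,
--     0xa2bfe8a1, 0xa81a664b, 0xc24b8b70, 0xc76c51a3,
--     0xd192e819, 0xd6990624, 0xf40e3585, 0x106aa070,
--     0x19a4c116, 0x1e376c08, 0x2748774c, 0x34b0bcb5,
--     0x391c0cb3, 0x4ed8aa4a, 0x5b9cca4f, 0x682e6ff3,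
--     0x748f82ee, 0x78a5636f, 0x84c87814, 0x8cc70208,
--     0x90befffa, 0xa4506ceb, 0xbef9a3f7, 0xc67178f2
-- ]
--
-- IV = [
--     0x6a09e667, 0xbb67ae85, 0x3c6ef372, 0xa54ff53a,
--     0x510e527f, 0x9b05688c, 0x1f83d9ab, 0x5be0cd19
-- ]
--
-- M32 = 0xFFFFFFFF
--
-- def rotr(x, r):
--     return ((x >> r) | (x << (32 - r))) & M32
--
-- def Sig0(a):
--     return rotr(a, 2) ^ rotr(a, 13) ^ rotr(a, 22)
--
-- def Sig1(e):
--     return rotr(e, 6) ^ rotr(e, 11) ^ rotr(e, 25)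
--
-- def Ch(e, f, g):
--     return ((e & f) ^ ((~e) & g)) & M32
--
-- def Maj(a, b, c):
--     return (a & b) ^ (a & c) ^ (b & c)
--
-- def add(*args):
--     s = 0
--     for x in args:
--         s = (s + x) & M32
--     return s
--
-- def sig0(x):
--     return rotr(x, 7) ^ rotr(x, 18) ^ (x >> 3)
--
-- def sig1(x):
--     return rotr(x, 17) ^ rotr(x, 19) ^ (x >> 10)
--
-- def sha256_forward(W_words, n_rounds=64):
--     """Forward SHA-256, returns list of states[0..n_rounds]."""
--     Wexp = list(W_words[:16])
--     for i in range(16, max(n_rounds, 16)):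
--         Wexp.append(add(Wexp[i-16], sig0(Wexp[i-15]), Wexp[i-7], sig1(Wexp[i-2])))
--
--     states = [list(IV)]
--     state = list(IV)
--     for t in range(n_rounds):
--         a, b, c, d, e, f, g, h = state
--         T1 = add(h, Sig1(e), Ch(e, f, g), K256[t], Wexp[t])
--         T2 = add(Sig0(a), Maj(a, b, c))
--         state = [add(T1, T2), a, b, c, add(d, T1), e, f, g]
--         states.append(list(state))
--
--     return states, Wexp
-- ===== SOURCE B (Python) =====
-- # B: single fused pass — each schedule word is computed on demand right before the
-- # round that consumes it, via a tail-recursive driver building states back-to-front-free.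
-- M32 = 0xFFFFFFFF
--
-- IV = [
--     0x6a09e667, 0xbb67ae85, 0x3c6ef372, 0xa54ff53a,
--     0x510e527f, 0x9b05688c, 0x1f83d9ab, 0x5be0cd19
-- ]
--
-- K256 = [
--     0x428a2f98, 0x71374491, 0xb5c0fbcf, 0xe9b5dba5,
--     0x3956c25b, 0x59f111f1, 0x923f82a4, 0xab1c5ed5,
--     0xd807aa98, 0x12835b01, 0x243185be, 0x550c7dc3,
--     0x72be5d74, 0x80deb1fe, 0x9bdc06a7, 0xc19bf174,
--     0xe49b69c1, 0xefbe4786, 0x0fc19dc6, 0x240ca1cc,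
--     0x2de92c6f, 0x4a7484aa, 0x5cb0a9dc, 0x76f988da,
--     0x983e5152, 0xa831c66d, 0xb00327c8, 0xbf597fc7,
--     0xc6e00bf3, 0xd5a79147, 0x06ca6351, 0x14292967,
--     0x27b70a85, 0x2e1b2138, 0x4d2c6dfc, 0x53380d13,
--     0x650a7354, 0x766a0abb, 0x81c2c92e, 0x92722c85,
--     0xa2bfe8a1, 0xa81a664b, 0xc24b8b70, 0xc76c51a3,
--     0xd192e819, 0xd6990624, 0xf40e3585, 0x106aa070,
--     0x19a4c116, 0x1e376c08, 0x2748774c, 0x34b0bcb5,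
--     0x391c0cb3, 0x4ed8aa4a, 0x5b9cca4f, 0x682e6ff3,
--     0x748f82ee, 0x78a5636f, 0x84c87814, 0x8cc70208,
--     0x90befffa, 0xa4506ceb, 0xbef9a3f7, 0xc67178f2
-- ]
--
-- def rotr(x, r):
--     return ((x >> r) | (x << (32 - r))) & M32
--
-- def Sig0(a):
--     return rotr(a, 2) ^ rotr(a, 13) ^ rotr(a, 22)
--
-- def Sig1(e):
--     return rotr(e, 6) ^ rotr(e, 11) ^ rotr(e, 25)
--
-- def Ch(e, f, g):
--     return ((e & f) ^ ((~e) & g)) & M32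
--
-- def Maj(a, b, c):
--     return (a & b) ^ (a & c) ^ (b & c)
--
-- def add(*args):
--     s = 0
--     for x in args:
--         s = (s + x) & M32
--     return s
--
-- def sig0(x):
--     return rotr(x, 7) ^ rotr(x, 18) ^ (x >> 3)
--
-- def sig1(x):
--     return rotr(x, 17) ^ rotr(x, 19) ^ (x >> 10)
--
-- def _round(state, k, w):
--     a, b, c, d, e, f, g, h = state
--     T1 = add(h, Sig1(e), Ch(e, f, g), k, w)
--     T2 = add(Sig0(a), Maj(a, b, c))
--     return [add(T1, T2), a, b, c, add(d, T1), e, f, g]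
--
-- def sha256_forward(W_words, n_rounds=64):
--     """Fused forward pass: schedule words are produced just-in-time per round."""
--     def go(t, state, Wexp, states):
--         if n_rounds <= t:
--             return states, Wexp
--         if 16 <= t:
--             Wexp = Wexp + [add(Wexp[t - 16], sig0(Wexp[t - 15]),
--                                Wexp[t - 7], sig1(Wexp[t - 2]))]
--         state = _round(state, K256[t], Wexp[t])
--         return go(t + 1, state, Wexp, states + [state])
--     return go(0, list(IV), list(W_words[:16]), [list(IV)])
-- ===== Notes on version B (the rewrite author's own statement) =====
-- stated objective: alternative
-- what changed: A first materialises the whole message schedule in one loop and then runs a second loop over it for the compression rounds; B is a single tail-recursive pass that computes each schedule word on demand immediately before the round that consumes it (with a separate round-step helper), so the schedule and the state grow together.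
import Mathlib
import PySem

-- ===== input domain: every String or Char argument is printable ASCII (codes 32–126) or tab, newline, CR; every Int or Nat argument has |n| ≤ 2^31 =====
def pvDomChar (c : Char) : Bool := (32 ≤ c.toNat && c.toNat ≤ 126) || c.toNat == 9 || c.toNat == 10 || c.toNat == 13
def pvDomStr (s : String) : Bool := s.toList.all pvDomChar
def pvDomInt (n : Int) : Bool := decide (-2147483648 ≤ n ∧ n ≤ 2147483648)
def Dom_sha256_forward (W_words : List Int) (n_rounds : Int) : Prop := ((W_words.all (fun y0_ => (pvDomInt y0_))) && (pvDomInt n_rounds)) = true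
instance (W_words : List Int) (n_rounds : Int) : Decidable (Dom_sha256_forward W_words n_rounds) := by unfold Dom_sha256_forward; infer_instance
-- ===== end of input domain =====

-- B fuses A's two loops into one just-in-time pass (schedule word computed right
-- before the round that uses it), with a separate round-step helper; equal cost.

-- shared arithmetic helpers (identical in Source A and Source B)
def pvK256 : List Int := [
  0x428a2f98, 0x71374491, 0xb5c0fbcf, 0xe9b5dba5,
  0x3956c25b, 0x59f111f1, 0x923f82a4, 0xab1c5ed5,
  0xd807aa98, 0x12835b01, 0x243185be, 0x550c7dc3,
  0x72be5d74, 0x80deb1fe, 0x9bdc06a7, 0xc19bf174,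
  0xe49b69c1, 0xefbe4786, 0x0fc19dc6, 0x240ca1cc,
  0x2de92c6f, 0x4a7484aa, 0x5cb0a9dc, 0x76f988da,
  0x983e5152, 0xa831c66d, 0xb00327c8, 0xbf597fc7,
  0xc6e00bf3, 0xd5a79147, 0x06ca6351, 0x14292967,
  0x27b70a85, 0x2e1b2138, 0x4d2c6dfc, 0x53380d13,
  0x650a7354, 0x766a0abb, 0x81c2c92e, 0x92722c85,
  0xa2bfe8a1, 0xa81a664b, 0xc24b8b70, 0xc76c51a3,
  0xd192e819, 0xd6990624, 0xf40e3585, 0x106aa070,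
  0x19a4c116, 0x1e376c08, 0x2748774c, 0x34b0bcb5,
  0x391c0cb3, 0x4ed8aa4a, 0x5b9cca4f, 0x682e6ff3,
  0x748f82ee, 0x78a5636f, 0x84c87814, 0x8cc70208,
  0x90befffa, 0xa4506ceb, 0xbef9a3f7, 0xc67178f2]

def pvIV : List Int := [0x6a09e667, 0xbb67ae85, 0x3c6ef372, 0xa54ff53a,
                       0x510e527f, 0x9b05688c, 0x1f83d9ab, 0x5be0cd19]

def pvM32 : Int := 0xFFFFFFFF

def pvRotr (x : Int) (r : Nat) : Int :=
  PySem.Int.band (PySem.Int.bor (x >>> r) (x <<< (32 - r))) pvM32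

def pvSig0 (a : Int) : Int := PySem.Int.bxor (PySem.Int.bxor (pvRotr a 2) (pvRotr a 13)) (pvRotr a 22)
def pvSig1 (e : Int) : Int := PySem.Int.bxor (PySem.Int.bxor (pvRotr e 6) (pvRotr e 11)) (pvRotr e 25)
def pvCh (e f g : Int) : Int :=
  PySem.Int.band (PySem.Int.bxor (PySem.Int.band e f) (PySem.Int.band (Int.not e) g)) pvM32
def pvMaj (a b c : Int) : Int :=
  PySem.Int.bxor (PySem.Int.bxor (PySem.Int.band a b) (PySem.Int.band a c)) (PySem.Int.band b c)
def pvAdd (args : List Int) : Int := List.foldl (fun s x => PySem.Int.band (s + x) pvM32) 0 args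
def pvsig0 (x : Int) : Int := PySem.Int.bxor (PySem.Int.bxor (pvRotr x 7) (pvRotr x 18)) (x >>> 3)
def pvsig1 (x : Int) : Int := PySem.Int.bxor (PySem.Int.bxor (pvRotr x 17) (pvRotr x 19)) (x >>> 10)

-- xs[i] for the indices proved in range under Pre_ (pyGet? = none is a Python IndexError)
def pvIdx (xs : List Int) (i : Int) : Int := (PySem.List.pyGet? xs i).getD 0

-- the appended schedule word (same expression in both sources)
def pvNextW (X : List Int) (i : Int) : Int :=
  pvAdd [pvIdx X (i-16), pvsig0 (pvIdx X (i-15)), pvIdx X (i-7), pvsig1 (pvIdx X (i-2))]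

-- ===== PORT A =====
def sha256_forward (W_words : List Int) (n_rounds : Int) : List (List Int) × List Int :=
  let Wexp0 := PySem.List.slice W_words none (some 16)
  let Wexp := List.foldl (fun X i => X ++ [pvNextW X i]) Wexp0
      (PySem.List.pyRange 16 (max n_rounds 16) 1)
  let r := List.foldl (fun (sp : List (List Int) × List Int) t =>
      let state := sp.2
      let a := pvIdx state 0; let b := pvIdx state 1; let c := pvIdx state 2; let d := pvIdx state 3
      let e := pvIdx state 4; let f := pvIdx state 5; let g := pvIdx state 6; let h := pvIdx state 7
      let T1 := pvAdd [h, pvSig1 e, pvCh e f g, pvIdx pvK256 t, pvIdx Wexp t]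
      let T2 := pvAdd [pvSig0 a, pvMaj a b c]
      let state' := [pvAdd [T1, T2], a, b, c, pvAdd [d, T1], e, f, g]
      (sp.1 ++ [state'], state'))
    ([pvIV], pvIV) (PySem.List.pyRange 0 n_rounds 1)
  (r.1, Wexp)

-- ===== PORT B =====
def pvRound (state : List Int) (k w : Int) : List Int :=
  let a := pvIdx state 0; let b := pvIdx state 1; let c := pvIdx state 2; let d := pvIdx state 3
  let e := pvIdx state 4; let f := pvIdx state 5; let g := pvIdx state 6; let h := pvIdx state 7
  let T1 := pvAdd [h, pvSig1 e, pvCh e f g, k, w]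
  let T2 := pvAdd [pvSig0 a, pvMaj a b c]
  [pvAdd [T1, T2], a, b, c, pvAdd [d, T1], e, f, g]

def pvGo (n t : Int) (state Wexp : List Int) (states : List (List Int)) :
    List (List Int) × List Int :=
  if _h : n ≤ t then (states, Wexp)
  else
    let Wexp' := if 16 ≤ t then Wexp ++ [pvNextW Wexp t] else Wexp
    let state' := pvRound state (pvIdx pvK256 t) (pvIdx Wexp' t)
    pvGo n (t+1) state' Wexp' (states ++ [state'])
termination_by (n - t).toNat
decreasing_by omega

def sha256_forward_alt (W_words : List Int) (n_rounds : Int) : List (List Int) × List Int :=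
  pvGo n_rounds 0 pvIV (PySem.List.slice W_words none (some 16)) [pvIV]

-- ===== PRECONDITION & SPEC =====
-- Exactly the inputs on which A returns (elsewhere A raises IndexError: the schedule or
-- the compression loop indexes past Wexp / K256; B raises on the same inputs).
def Pre_sha256_forward (W_words : List Int) (n_rounds : Int) : Prop :=
  n_rounds ≤ 0 ∨ (n_rounds ≤ 64 ∧
    ((n_rounds ≤ 16 ∧ n_rounds ≤ W_words.length) ∨ (16 < n_rounds ∧ 16 ≤ W_words.length)))
instance (W_words : List Int) (n_rounds : Int) : Decidable (Pre_sha256_forward W_words n_rounds) := by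
  unfold Pre_sha256_forward; infer_instance

def pvWitness_sha256_forward : List Int × Int :=
  ([1, 2, 3, 4, 5, 6, 7, 8, 9, 10, 11, 12, 13, 14, 15, 16], 18)

def Spec_sha256_forward (W_words : List Int) (n_rounds : Int) (out : List (List Int) × List Int) : Prop := out = sha256_forward_alt W_words n_rounds
instance (W_words : List Int) (n_rounds : Int) (out : List (List Int) × List Int) : Decidable (Spec_sha256_forward W_words n_rounds out) := by unfold Spec_sha256_forward; infer_instance

-- ===== CLAIM (what is proved, stated in full; the proofs are below) =====
def Claim_equal_sha256_forward : Prop := ∀ (W_words : List Int) (n_rounds : Int), Dom_sha256_forward W_words n_rounds → Pre_sha256_forward W_words n_rounds → Spec_sha256_forward W_words n_rounds (sha256_forward W_words n_rounds)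

-- ===== LEMMAS AND PROOFS =====

-- A's schedule expanded up to bound m
def pvEA (W0 : List Int) (m : Int) : List Int :=
  List.foldl (fun X i => X ++ [pvNextW X i]) W0 (PySem.List.pyRange 16 m 1)

lemma pvEA_le (W0 : List Int) (m : Int) (h : m ≤ 16) : pvEA W0 m = W0 := by
  unfold pvEA
  rw [PySem.List.pyRange_one_eq_nil (by omega)]
  rfl

lemma pvEA_succ (W0 : List Int) (m : Int) (h : 16 ≤ m) :
    pvEA W0 (m + 1) = pvEA W0 m ++ [pvNextW (pvEA W0 m) m] := by
  unfold pvEA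
  rw [PySem.List.pyRange_one_succ_right (by omega), List.foldl_append]
  rfl

lemma pvEA_length (W0 : List Int) (m : Int) (h : 16 ≤ m) :
    (pvEA W0 m).length = W0.length + (m - 16).toNat := by
  have key : ∀ k : Nat, ∀ m : Int, m - 16 = (k : Int) →
      (pvEA W0 m).length = W0.length + k := by
    intro k
    induction k with
    | zero => intro m hm; rw [pvEA_le W0 m (by omega)]; simp
    | succ k ih =>
      intro m hm
      have hm' : m = (m - 1) + 1 := by omega
      rw [hm', pvEA_succ W0 (m-1) (by omega)]
      simp [ih (m-1) (by omega)]
      omega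
  have := key (m - 16).toNat m (by omega)
  omega

lemma pvEA_prefix (W0 : List Int) (m m' : Int) (h : m ≤ m') :
    pvEA W0 m <+: pvEA W0 m' := by
  by_cases h16 : m' ≤ 16
  · rw [pvEA_le W0 m (by omega), pvEA_le W0 m' (by omega)]
  · push_neg at h16
    by_cases hm16 : m ≤ 16
    · -- reduce to the case m = 16
      rw [pvEA_le W0 m hm16, show W0 = pvEA W0 16 from (pvEA_le W0 16 (le_refl _)).symm]
      have key : ∀ k : Nat, ∀ m' : Int, m' - 16 = (k : Int) → pvEA W0 16 <+: pvEA W0 m' := by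
        intro k
        induction k with
        | zero => intro m' hm'; rw [show m' = 16 by omega]
        | succ k ih =>
          intro m' hm'
          have hm'' : m' = (m' - 1) + 1 := by omega
          rw [hm'', pvEA_succ W0 (m'-1) (by omega)]
          exact (ih (m'-1) (by omega)).trans (List.prefix_append _ _)
      exact key (m' - 16).toNat m' (by omega)
    · push_neg at hm16
      have key : ∀ k : Nat, ∀ m' : Int, m' - m = (k : Int) → pvEA W0 m <+: pvEA W0 m' := by
        intro k
        induction k with
        | zero => intro m' hm'; rw [show m' = m by omega]
        | succ k ih =>
          intro m' hm'
          have hm'' : m' = (m' - 1) + 1 := by omega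
          rw [hm'', pvEA_succ W0 (m'-1) (by omega)]
          exact (ih (m'-1) (by omega)).trans (List.prefix_append _ _)
      exact key (m' - m).toNat m' (by omega)

-- agreement of pvIdx on a common prefix, inside range
lemma pvIdx_prefix (xs ys : List Int) (i : Int) (hp : xs <+: ys)
    (h0 : 0 ≤ i) (hl : i < xs.length) : pvIdx xs i = pvIdx ys i := by
  obtain ⟨rest, rfl⟩ := hp
  unfold pvIdx
  rw [PySem.List.pyGet?_of_nonneg xs h0, PySem.List.pyGet?_of_nonneg (xs ++ rest) h0,
      List.getElem?_append_left (by omega)]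

-- the key index fact: B reads the same schedule word as A
lemma pvIdx_sched (W0 : List Int) (t n : Int) (h0 : 0 ≤ t) (ht : t < n)
    (hlen : (n ≤ 16 → n ≤ W0.length) ∧ (16 < n → W0.length = 16)) :
    pvIdx (pvEA W0 (max (t+1) 16)) t = pvIdx (pvEA W0 (max n 16)) t := by
  apply pvIdx_prefix _ _ _ (pvEA_prefix W0 _ _ (max_le_max (by omega) le_rfl)) h0
  by_cases h16 : t + 1 ≤ 16
  · rw [show max (t+1) 16 = 16 from max_eq_right (by omega), pvEA_le W0 16 (le_refl _)]
    rcases le_or_gt n 16 with hn | hn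
    · have := hlen.1 hn; omega
    · have := hlen.2 hn; omega
  · have hn : 16 < n := by omega
    have h16' : W0.length = 16 := hlen.2 hn
    rw [show max (t+1) 16 = t + 1 from max_eq_left (by omega), pvEA_length W0 (t+1) (by omega)]
    omega

-- abbreviation for A's compression step with full schedule Wfull
def pvStepA (Wfull : List Int) (sp : List (List Int) × List Int) (t : Int) :
    List (List Int) × List Int :=
  (sp.1 ++ [pvRound sp.2 (pvIdx pvK256 t) (pvIdx Wfull t)], pvRound sp.2 (pvIdx pvK256 t) (pvIdx Wfull t))

-- the main fused-loop invariant
lemma pvGo_eq (W0 : List Int) (n : Int)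
    (hlen : (n ≤ 16 → n ≤ W0.length) ∧ (16 < n → W0.length = 16)) :
    ∀ k : Nat, ∀ t : Int, 0 ≤ t → t ≤ n → n - t ≤ (k : Int) →
    ∀ (s : List Int) (acc : List (List Int)),
    pvGo n t s (pvEA W0 (max t 16)) acc =
      ((List.foldl (pvStepA (pvEA W0 (max n 16))) (acc, s) (PySem.List.pyRange t n 1)).1,
       pvEA W0 (max n 16)) := by
  intro k
  induction k with
  | zero =>
    intro t ht0 htn hk s acc
    have hnt : t = n := by omega
    subst hnt
    rw [pvGo, dif_pos le_rfl, PySem.List.pyRange_one_eq_nil le_rfl]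
    rfl
  | succ k ih =>
    intro t ht0 htn hk s acc
    by_cases hnt : n ≤ t
    · have ht : t = n := by omega
      subst ht
      rw [pvGo, dif_pos le_rfl, PySem.List.pyRange_one_eq_nil le_rfl]
      rfl
    · push_neg at hnt
      rw [pvGo, dif_neg (by omega)]
      have hW' : (if 16 ≤ t then pvEA W0 (max t 16) ++ [pvNextW (pvEA W0 (max t 16)) t]
                   else pvEA W0 (max t 16)) = pvEA W0 (max (t+1) 16) := by
        by_cases h16 : 16 ≤ t
        · rw [if_pos h16, show max t 16 = t from max_eq_left (by omega),
              show max (t+1) 16 = t + 1 from max_eq_left (by omega), pvEA_succ W0 t h16]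
        · rw [if_neg h16, show max t 16 = 16 from max_eq_right (by omega),
              show max (t+1) 16 = 16 from max_eq_right (by omega)]
      simp only [hW']
      rw [ih (t+1) (by omega) (by omega) (by omega)]
      rw [PySem.List.pyRange_one_cons hnt, List.foldl_cons]
      rw [pvIdx_sched W0 t n ht0 hnt hlen]
      rfl

-- arithmetic on the slice length: (W[:16]).length = min |W| 16
lemma pvSlice16_length (W : List Int) :
    (PySem.List.slice W none (some 16)).length = min W.length 16 := by
  rw [show (16:Int) = ((16:Nat):Int) by norm_num, PySem.List.slice_to_natCast]
  simp [List.length_take, Nat.min_comm]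

-- ===== VERDICT (by name: the statement is the Claim_ definition above) =====
theorem sha256_forward_spec : Claim_equal_sha256_forward := by
  intro W n _hdom hpre
  unfold Spec_sha256_forward
  set W0 := PySem.List.slice W none (some 16) with hW0
  have hW0len : W0.length = min W.length 16 := pvSlice16_length W
  have hlen : (n ≤ 16 → n ≤ W0.length) ∧ (16 < n → W0.length = 16) := by
    unfold Pre_sha256_forward at hpre
    constructor <;> intro h <;> omega
  have hA : sha256_forward W n =
      ((List.foldl (pvStepA (pvEA W0 (max n 16))) ([pvIV], pvIV)
        (PySem.List.pyRange 0 n 1)).1, pvEA W0 (max n 16)) := rfl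
  have hB : sha256_forward_alt W n = pvGo n 0 pvIV W0 [pvIV] := rfl
  by_cases hn0 : n ≤ 0
  · rw [hA, hB, pvGo, dif_pos hn0, PySem.List.pyRange_one_eq_nil hn0,
        show max n 16 = 16 from max_eq_right (by omega), pvEA_le W0 16 le_rfl]
    rfl
  · push_neg at hn0
    have hstart : pvGo n 0 pvIV W0 [pvIV] = pvGo n 0 pvIV (pvEA W0 (max 0 16)) [pvIV] := by
      rw [show max (0:Int) 16 = 16 from max_eq_right (by norm_num), pvEA_le W0 16 le_rfl]
    rw [hA, hB, hstart,
        pvGo_eq W0 n hlen (n - 0).toNat 0 le_rfl (by omega) (by omega) pvIV [pvIV]]
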